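-- pv_equiv track=rewrite | github.com/jiekaitao/SeniorProject | TRM_Spinner/scripts/make_hanoi_xlsx.py | pegs_to_grid
-- ===== SOURCE A (Python) =====
-- def pegs_to_grid(pegs, height):
--     grid = []
--     for row in range(height):
--         r = []
--         for peg in pegs:
--             r.append(peg[row] if row < len(peg) else 0)
--         grid.append(r)
--     return list(reversed(grid))
-- ===== SOURCE B (Python) =====
-- def pegs_to_grid(pegs, height):
--     if not pegs:
--         # zip(*[]) would yield no rows; the grid still has one (empty) row per level
--         return [[] for _ in range(height)]
--     cols = [[peg[r] if r < len(peg) else 0 for r in range(height)] for peg in pegs]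
--     return [list(t) for t in zip(*cols)][::-1]
-- ===== Notes on version B (the rewrite author's own statement) =====
-- stated objective: idiomatic
-- what changed: Instead of scattering row-major with a nested append loop and then reversing, B builds one padded column per peg and obtains the rows by transposing with zip(*cols), reversing with a slice.
import Mathlib
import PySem

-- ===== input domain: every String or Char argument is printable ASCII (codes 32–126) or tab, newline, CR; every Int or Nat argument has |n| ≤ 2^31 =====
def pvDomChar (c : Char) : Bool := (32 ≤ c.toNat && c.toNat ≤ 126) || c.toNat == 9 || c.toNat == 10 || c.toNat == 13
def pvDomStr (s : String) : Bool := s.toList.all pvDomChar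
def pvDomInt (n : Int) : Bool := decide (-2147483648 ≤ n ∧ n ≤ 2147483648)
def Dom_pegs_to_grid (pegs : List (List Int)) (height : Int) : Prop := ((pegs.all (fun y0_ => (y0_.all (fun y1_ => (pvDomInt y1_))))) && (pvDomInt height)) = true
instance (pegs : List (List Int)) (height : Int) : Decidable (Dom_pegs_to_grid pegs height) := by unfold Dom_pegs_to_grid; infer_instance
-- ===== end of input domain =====

-- B replaces A's row-major scatter-then-reverse with per-peg padded columns transposed
-- via zip(*cols); same asymptotic cost, more idiomatic decomposition.


-- ===== PORT A =====
-- literal transliteration: grid accumulator, inner append loop over pegs, final reverse.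
-- peg[row] is only evaluated under 0 ≤ row < len(peg), so pyGetD is exact there.
def pegs_to_grid (pegs : List (List Int)) (height : Int) : List (List Int) :=
  ((PySem.List.pyRange 0 height 1).foldl
    (fun grid row =>
      grid ++ [pegs.foldl (fun r peg =>
        r ++ [if row < (peg.length : Int) then PySem.List.pyGetD peg row 0 else 0]) []])
    []).reverse

-- ===== PORT B =====
-- zip(*cols): take the heads of all lists until some list is exhausted (Python zip
-- semantics; zip() with no arguments yields nothing). The fuel argument only bounds
-- the recursion for totality; height.toNat fuel is enough for columns of that length.
def pvZipAll : Nat → List (List Int) → List (List Int)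
  | 0, _ => []
  | fuel + 1, ls =>
      if ls.isEmpty || ls.any (·.isEmpty) then []
      else ls.map (fun c => c.headD 0) :: pvZipAll fuel (ls.map (·.tail))

def pvCols (pegs : List (List Int)) (height : Int) : List (List Int) :=
  pegs.map (fun peg =>
    (PySem.List.pyRange 0 height 1).map (fun r =>
      if r < (peg.length : Int) then PySem.List.pyGetD peg r 0 else 0))

def pegs_to_grid_alt (pegs : List (List Int)) (height : Int) : List (List Int) :=
  if pegs.isEmpty then
    (PySem.List.pyRange 0 height 1).map (fun _ => ([] : List Int))
  else
    (pvZipAll height.toNat (pvCols pegs height)).reverse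

-- ===== PRECONDITION & SPEC =====
def Spec_pegs_to_grid (pegs : List (List Int)) (height : Int) (out : List (List Int)) : Prop := out = pegs_to_grid_alt pegs height
instance (pegs : List (List Int)) (height : Int) (out : List (List Int)) : Decidable (Spec_pegs_to_grid pegs height out) := by unfold Spec_pegs_to_grid; infer_instance

-- ===== CLAIM (what is proved, stated in full; the proofs are below) =====
def Claim_equal_pegs_to_grid : Prop := ∀ (pegs : List (List Int)) (height : Int), Dom_pegs_to_grid pegs height → Spec_pegs_to_grid pegs height (pegs_to_grid pegs height)

-- ===== LEMMAS AND PROOFS =====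

-- the cell value both programs compute for peg at level r
def pvEnt (peg : List Int) (r : Int) : Int :=
  if r < (peg.length : Int) then PySem.List.pyGetD peg r 0 else 0

theorem pvRange_cast (height : Int) :
    PySem.List.pyRange 0 height 1 = (List.range height.toNat).map (fun k : Nat => (k : Int)) := by
  rw [PySem.List.pyRange_one]
  simp only [sub_zero, zero_add]

-- zip(*cols) of nonempty ls whose members all have length n is the row-by-row transpose
theorem pvZipAll_eq (n : Nat) (ls : List (List Int)) (hne : ls ≠ [])
    (hlen : ∀ c ∈ ls, c.length = n) :
    pvZipAll n ls = (List.range n).map (fun r => ls.map (fun c => c.getD r 0)) := by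
  induction n generalizing ls with
  | zero => simp [pvZipAll]
  | succ m ih =>
      have hguard : (ls.isEmpty || ls.any (·.isEmpty)) = false := by
        simp only [Bool.or_eq_false_iff, List.isEmpty_eq_false_iff, List.any_eq_false]
        exact ⟨hne, fun c hc => by
          have := hlen c hc; simp [List.isEmpty_iff]; intro h; simp [h] at this⟩
      rw [pvZipAll, hguard]
      simp only [Bool.false_eq_true, if_false]
      have htail : ∀ c ∈ ls.map (·.tail), c.length = m := by
        intro c hc
        obtain ⟨d, hd, rfl⟩ := List.mem_map.mp hc
        have := hlen d hd
        simp [List.length_tail, this]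
      have htne : ls.map (·.tail) ≠ [] := by
        simp [List.map_eq_nil_iff]; exact hne
      rw [ih (ls.map (·.tail)) htne htail]
      rw [List.range_succ_eq_map]
      simp only [List.map_cons, List.map_map]
      congr 1
      · apply List.map_congr_left
        intro c _
        cases c <;> simp [List.getD]
      · apply List.map_congr_left
        intro r _
        apply List.map_congr_left
        intro c _
        cases c <;> simp [List.getD]

-- A as a map over the row range followed by the final reverse
theorem pegs_to_grid_eq (pegs : List (List Int)) (height : Int) :
    pegs_to_grid pegs height =
      ((PySem.List.pyRange 0 height 1).map
        (fun row => pegs.map (fun peg => pvEnt peg row))).reverse := by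
  unfold pegs_to_grid
  have h2 : (PySem.List.pyRange 0 height 1).foldl
      (fun grid row => grid ++ [pegs.foldl (fun r peg =>
        r ++ [if row < (peg.length : Int) then PySem.List.pyGetD peg row 0 else 0]) []]) [] =
      (PySem.List.pyRange 0 height 1).map (fun row => pegs.map (fun peg => pvEnt peg row)) := by
    rw [PySem.List.foldl_append_singleton_eq_map]
    simp only [List.nil_append]
    apply List.map_congr_left
    intro row _
    rw [PySem.List.foldl_append_singleton_eq_map]
    simp [pvEnt]
  rw [h2]

-- ===== VERDICT (by name: the statement is the Claim_ definition above) =====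
theorem pegs_to_grid_spec : Claim_equal_pegs_to_grid := by
  intro pegs height _
  unfold Spec_pegs_to_grid pegs_to_grid_alt
  rw [pegs_to_grid_eq]
  by_cases hp : pegs.isEmpty
  · rw [if_pos hp]
    have : pegs = [] := List.isEmpty_iff.mp hp
    subst this
    simp [List.map_const', List.reverse_replicate]
  · rw [if_neg hp]
    have hne : pegs ≠ [] := by simpa [List.isEmpty_iff] using hp
    have hcne : pvCols pegs height ≠ [] := by
      simp [pvCols, List.map_eq_nil_iff]; exact hne
    have hclen : ∀ c ∈ pvCols pegs height, c.length = height.toNat := by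
      intro c hc
      obtain ⟨peg, _, rfl⟩ := List.mem_map.mp hc
      simp [PySem.List.length_pyRange_one]
    rw [pvZipAll_eq height.toNat (pvCols pegs height) hcne hclen]
    congr 1
    rw [pvRange_cast, List.map_map]
    apply List.map_congr_left
    intro r hr
    have hrn : r < height.toNat := List.mem_range.mp hr
    simp only [Function.comp_apply]
    unfold pvCols
    rw [List.map_map]
    apply List.map_congr_left
    intro peg _
    simp only [Function.comp_apply]
    rw [pvRange_cast, List.map_map]
    have hget : ∀ (f : Nat → Int), ((List.range height.toNat).map f).getD r 0 = f r :=
      fun f => by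
        rw [List.getD_eq_getElem?_getD]
        simp [List.getElem?_map, List.getElem?_range hrn]
    rw [hget]
    simp [pvEnt]
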